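-- pv_equiv track=rewrite | github.com/olivia-rippee/Python-for-Computational-Biology-and-Bioinformatics | Bioinformatics V - Genomic Data Science and Clustering/3 Population Genetics.py | CountCompatibleColumns
-- ===== SOURCE A (Python) =====
-- from itertools import product
--
-- def CountCompatibleColumns(v):
--     '''Counts how many binary columns of the same length as v are compatible
--     with v. Two binary columns are compatible if their 1s are either subset,
--     superset, or disjoint with respect to each other.
--
--     Input: A binary tuple representing the reference column (e.g. (1, 0, 1, 0, 1)).
--     Output: Number of compatible binary columns.'''
--
--     n = len(v)
--     Ov = {i for i, val in enumerate(v) if val == 1}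
--     compatible_count = 0
--
--     for w in product([0, 1], repeat=n):
--         Ow = {i for i, val in enumerate(w) if val == 1}
--
--         if Ow.issubset(Ov) or Ov.issubset(Ow) or Ov.isdisjoint(Ow):
--             compatible_count += 1
--
--     return compatible_count
--
-- v = (1, 0, 1, 0, 1)
-- ===== SOURCE B (Python) =====
-- def CountCompatibleColumns(v):
--     n = len(v)
--     k = sum(1 for x in v if x == 1)
--     if k == 0:
--         return 2 ** n
--     return 2 ** k + 2 ** (n - k + 1) - 2
-- ===== Notes on version B (the rewrite author's own statement) =====
-- stated objective: faster
-- what changed: Replaced the exhaustive enumeration of all 2^n binary columns with set comparisons by a closed-form inclusion-exclusion count 2^k + 2*2^(n-k) - 2 (2^n when k = 0), where k is the number of 1s in v.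
import Mathlib
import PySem

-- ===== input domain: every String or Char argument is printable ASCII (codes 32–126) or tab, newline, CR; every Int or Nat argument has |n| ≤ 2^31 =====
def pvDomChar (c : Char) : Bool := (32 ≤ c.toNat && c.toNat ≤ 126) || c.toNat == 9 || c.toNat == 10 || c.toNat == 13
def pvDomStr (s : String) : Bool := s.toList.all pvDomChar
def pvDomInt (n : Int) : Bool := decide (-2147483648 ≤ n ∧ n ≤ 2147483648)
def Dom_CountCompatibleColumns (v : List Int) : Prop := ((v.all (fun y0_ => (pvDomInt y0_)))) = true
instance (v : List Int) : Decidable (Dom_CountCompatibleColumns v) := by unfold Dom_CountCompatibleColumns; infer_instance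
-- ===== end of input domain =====

-- B replaces A's exhaustive enumeration of all 2^n binary columns by a closed-form
-- inclusion-exclusion count (2^k + 2*2^(n-k) - 2, or 2^n when k = 0), k = number of 1s in v.


-- ===== PORT A =====
-- itertools.product([0, 1], repeat=n), in itertools order (first coordinate varies slowest)
def pvProduct01 : Nat → List (List Int)
  | 0 => [[]]
  | n+1 => ([0, 1] : List Int).flatMap (fun b => (pvProduct01 n).map (fun t => b :: t))

-- the set comprehension {i for i, val in enumerate(x) if val == 1}
def pvOnes (x : List Int) : PySem.Set Int :=
  PySem.Set.ofList (((PySem.List.enumerate x 0).filter (fun p => p.2 == 1)).map (·.1))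

def CountCompatibleColumns (v : List Int) : Int :=
  let n := v.length
  let Ov := pvOnes v
  (pvProduct01 n).foldl (fun acc w =>
    let Ow := pvOnes w
    if (PySem.Set.issubset Ow Ov || PySem.Set.issubset Ov Ow || PySem.Set.isdisjoint Ov Ow)
    then acc + 1 else acc) 0

-- ===== PORT B =====
def CountCompatibleColumns_alt (v : List Int) : Int :=
  let n := v.length
  let k := v.countP (fun x => x == 1)
  if k = 0 then 2 ^ n else 2 ^ k + 2 ^ (n - k + 1) - 2

-- ===== PRECONDITION & SPEC =====
def Spec_CountCompatibleColumns (v : List Int) (out : Int) : Prop := out = CountCompatibleColumns_alt v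
instance (v : List Int) (out : Int) : Decidable (Spec_CountCompatibleColumns v out) := by unfold Spec_CountCompatibleColumns; infer_instance

-- ===== CLAIM (what is proved, stated in full; the proofs are below) =====
def Claim_equal_CountCompatibleColumns : Prop := ∀ (v : List Int), Dom_CountCompatibleColumns v → Spec_CountCompatibleColumns v (CountCompatibleColumns v)

-- ===== LEMMAS AND PROOFS =====

-- pointwise compatibility tests along the zip of v and w
def pvZipAll (f : Int → Int → Bool) (v w : List Int) : Bool := (v.zip w).all (fun p => f p.1 p.2)

def pvFsub (a b : Int) : Bool := !(b == 1) || (a == 1)   -- Ow ⊆ Ov at one position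
def pvFsup (a b : Int) : Bool := !(a == 1) || (b == 1)   -- Ov ⊆ Ow at one position
def pvFdis (a b : Int) : Bool := !((a == 1) && (b == 1)) -- disjointness at one position

lemma mem_pvOnes (x : List Int) (j : Int) :
    j ∈ pvOnes x ↔ ∃ (k : Nat), (∃ _ : k < x.length, x[k] = 1) ∧ j = (k : Int) := by
  unfold pvOnes
  rw [PySem.Set.mem_ofList]
  simp [List.mem_map, List.mem_filter, PySem.List.mem_enumerate_iff]
  exact exists_congr fun k => and_comm

lemma pvZipAll_iff (f : Int → Int → Bool) (v w : List Int) (hl : w.length = v.length) :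
    pvZipAll f v w = true ↔ ∀ (k : Nat) (h : k < v.length), f v[k] (w[k]'(by omega)) = true := by
  unfold pvZipAll
  rw [List.all_eq_true]
  constructor
  · intro H k h
    have := H ((v.zip w)[k]'(by simp [List.length_zip]; omega)) (List.getElem_mem _)
    simpa [List.getElem_zip] using this
  · intro H p hp
    obtain ⟨i, hi, rfl⟩ := List.mem_iff_getElem.1 hp
    have hi' : i < v.length := by simp [List.length_zip] at hi; omega
    simpa [List.getElem_zip] using H i hi'

lemma sub_bridge (v w : List Int) (hl : w.length = v.length) :
    PySem.Set.issubset (pvOnes w) (pvOnes v) = pvZipAll pvFsub v w := by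
  rw [Bool.eq_iff_iff, PySem.Set.issubset_iff, pvZipAll_iff _ _ _ hl]
  constructor
  · intro H k hk
    unfold pvFsub
    by_cases hw : w[k]'(by omega) = 1
    · have hj : (k:Int) ∈ pvOnes w := (mem_pvOnes w _).2 ⟨k, ⟨by omega, hw⟩, rfl⟩
      obtain ⟨k', ⟨hk', hv⟩, he⟩ := (mem_pvOnes v _).1 (H _ hj)
      have : k = k' := by exact_mod_cast he
      subst this
      simp [hv]
    · simp [hw]
  · intro H j hj
    obtain ⟨k, ⟨hk, hw⟩, rfl⟩ := (mem_pvOnes w _).1 hj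
    have := H k (by omega)
    unfold pvFsub at this
    simp [hw] at this
    exact (mem_pvOnes v _).2 ⟨k, ⟨by omega, by simpa using this⟩, rfl⟩

lemma sup_bridge (v w : List Int) (hl : w.length = v.length) :
    PySem.Set.issubset (pvOnes v) (pvOnes w) = pvZipAll pvFsup v w := by
  rw [Bool.eq_iff_iff, PySem.Set.issubset_iff, pvZipAll_iff _ _ _ hl]
  constructor
  · intro H k hk
    unfold pvFsup
    by_cases hv : v[k] = 1
    · have hj : (k:Int) ∈ pvOnes v := (mem_pvOnes v _).2 ⟨k, ⟨hk, hv⟩, rfl⟩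
      obtain ⟨k', ⟨hk', hw⟩, he⟩ := (mem_pvOnes w _).1 (H _ hj)
      have : k = k' := by exact_mod_cast he
      subst this
      simp [hw]
    · simp [hv]
  · intro H j hj
    obtain ⟨k, ⟨hk, hv⟩, rfl⟩ := (mem_pvOnes v _).1 hj
    have := H k hk
    unfold pvFsup at this
    simp [hv] at this
    exact (mem_pvOnes w _).2 ⟨k, ⟨by omega, by simpa using this⟩, rfl⟩

lemma dis_bridge (v w : List Int) (hl : w.length = v.length) :
    PySem.Set.isdisjoint (pvOnes v) (pvOnes w) = pvZipAll pvFdis v w := by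
  rw [Bool.eq_iff_iff, PySem.Set.isdisjoint_iff, pvZipAll_iff _ _ _ hl]
  constructor
  · intro H k hk
    unfold pvFdis
    by_cases hv : v[k] = 1
    · have hj : (k:Int) ∈ pvOnes v := (mem_pvOnes v _).2 ⟨k, ⟨hk, hv⟩, rfl⟩
      have hnw := H _ hj
      by_cases hw : w[k]'(by omega) = 1
      · exact absurd ((mem_pvOnes w _).2 ⟨k, ⟨by omega, hw⟩, rfl⟩) hnw
      · simp [hw]
    · simp [hv]
  · intro H j hj hj'
    obtain ⟨k, ⟨hk, hv⟩, rfl⟩ := (mem_pvOnes v _).1 hj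
    obtain ⟨k', ⟨hk', hw⟩, he⟩ := (mem_pvOnes w _).1 hj'
    have : k = k' := by exact_mod_cast he
    subst this
    have := H k hk
    unfold pvFdis at this
    simp [hv, hw] at this

lemma length_mem_pvProduct01 : ∀ (n : Nat) (w : List Int), w ∈ pvProduct01 n → w.length = n := by
  intro n
  induction n with
  | zero => intro w hw; simp [pvProduct01] at hw; simp [hw]
  | succ m ih =>
    intro w hw
    simp [pvProduct01, List.mem_map] at hw
    obtain ⟨t, ht, rfl⟩ | ⟨t, ht, rfl⟩ := hw <;> simp [ih t ht]

lemma countP_congr_mem {α : Type} (l : List α) (p q : α → Bool) (h : ∀ x ∈ l, p x = q x) :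
    l.countP p = l.countP q := by
  induction l with
  | nil => rfl
  | cons a t ih => simp [List.countP_cons, h a (by simp), ih (fun x hx => h x (by simp [hx]))]

lemma countP_or_add {α : Type} (l : List α) (p q : α → Bool) :
    l.countP (fun x => p x || q x) + l.countP (fun x => p x && q x) = l.countP p + l.countP q := by
  induction l with
  | nil => rfl
  | cons a t ih => simp [List.countP_cons]; cases hp : p a <;> cases hq : q a <;> (simp; omega)

lemma all_and_zip (f g : Int → Int → Bool) (v w : List Int) :
    (pvZipAll f v w && pvZipAll g v w) = pvZipAll (fun a b => f a b && g a b) v w := by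
  unfold pvZipAll
  induction (v.zip w) with
  | nil => rfl
  | cons a t ih => simp at ih ⊢; cases f a.1 a.2 <;> cases g a.1 a.2 <;> simp_all

-- countP over all tuples of a pointwise predicate is a product of per-position weights
lemma countP_tuples (f : Int → Int → Bool) : ∀ v : List Int,
    (pvProduct01 v.length).countP (fun w => pvZipAll f v w) =
    (v.map (fun a => (if f a 0 then 1 else 0) + (if f a 1 then 1 else 0))).prod := by
  intro v
  induction v with
  | nil => simp [pvProduct01, pvZipAll]
  | cons a t ih =>
    show (pvProduct01 (t.length + 1)).countP _ = _
    simp only [pvProduct01, List.flatMap_cons, List.flatMap_nil, List.append_nil,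
      List.countP_append, List.countP_map]
    have h0 : ((pvProduct01 t.length).countP ((fun w => pvZipAll f (a :: t) w) ∘ (fun u => (0:Int) :: u)))
        = if f a 0 then (pvProduct01 t.length).countP (fun w => pvZipAll f t w) else 0 := by
      cases hf : f a 0 with
      | true =>
        rw [if_pos rfl]
        apply countP_congr_mem; intro x _; simp [pvZipAll, hf]
      | false =>
        rw [if_neg Bool.false_ne_true]
        rw [List.countP_eq_zero]; intro x _; simp [pvZipAll, hf]
    have h1 : ((pvProduct01 t.length).countP ((fun w => pvZipAll f (a :: t) w) ∘ (fun u => (1:Int) :: u)))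
        = if f a 1 then (pvProduct01 t.length).countP (fun w => pvZipAll f t w) else 0 := by
      cases hf : f a 1 with
      | true =>
        rw [if_pos rfl]
        apply countP_congr_mem; intro x _; simp [pvZipAll, hf]
      | false =>
        rw [if_neg Bool.false_ne_true]
        rw [List.countP_eq_zero]; intro x _; simp [pvZipAll, hf]
    rw [h0, h1, ih]
    simp only [List.map_cons, List.prod_cons]
    cases f a 0 <;> cases f a 1 <;> simp <;> ring

-- weight-product evaluation: weight c1 at positions equal to 1, c0 elsewhere
lemma prod_weight (c1 c0 : Nat) : ∀ v : List Int,
    (v.map (fun a => if a == 1 then c1 else c0)).prod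
      = c1 ^ (v.countP (fun x => x == 1)) * c0 ^ (v.length - v.countP (fun x => x == 1)) := by
  intro v
  induction v with
  | nil => simp
  | cons a t ih =>
    have hc := List.countP_le_length (p := fun x : Int => x == 1) (l := t)
    rw [List.map_cons, List.prod_cons, ih, List.countP_cons]
    by_cases h : a = 1
    · simp only [h]
      simp [pow_succ]
      ring
    · have hb : ((a == 1) : Bool) = false := by simp [h]
      simp only [hb, List.length_cons]
      simp
      rw [Nat.sub_add_comm hc, pow_succ]
      ring

-- evaluate one pointwise count: countP of pvZipAll f = c1^k * c0^(n-k) when f's weights are (c1, c0)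
lemma count_eval (f : Int → Int → Bool) (c1 c0 : Nat) (v : List Int)
    (h1 : ∀ a : Int, a = 1 → ((if f a 0 then 1 else 0) + (if f a 1 then 1 else 0) : Nat) = c1)
    (h0 : ∀ a : Int, a ≠ 1 → ((if f a 0 then 1 else 0) + (if f a 1 then 1 else 0) : Nat) = c0) :
    (pvProduct01 v.length).countP (fun w => pvZipAll f v w)
      = c1 ^ (v.countP (fun x => x == 1)) * c0 ^ (v.length - v.countP (fun x => x == 1)) := by
  rw [countP_tuples, ← prod_weight]
  congr 1
  apply List.map_congr_left
  intro a _
  by_cases h : a = 1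
  · rw [h1 a h, if_pos (by simp [h])]
  · rw [h0 a h, if_neg (by simp [h])]

-- ===== VERDICT (by name: the statement is the Claim_ definition above) =====
theorem CountCompatibleColumns_spec : Claim_equal_CountCompatibleColumns := by
  intro v _
  unfold Spec_CountCompatibleColumns CountCompatibleColumns CountCompatibleColumns_alt
  simp only []
  rw [PySem.List.foldl_if_add_one]
  set L := pvProduct01 v.length with hL
  set n := v.length with hn
  set k := v.countP (fun x => x == 1) with hk
  have hkn : k ≤ n := List.countP_le_length
  -- replace the set-based test by the pointwise one
  have hstep : L.countP (fun w => PySem.Set.issubset (pvOnes w) (pvOnes v) ||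
        PySem.Set.issubset (pvOnes v) (pvOnes w) || PySem.Set.isdisjoint (pvOnes v) (pvOnes w))
      = L.countP (fun w => pvZipAll pvFsub v w || (pvZipAll pvFsup v w || pvZipAll pvFdis v w)) := by
    apply countP_congr_mem
    intro w hw
    have hl : w.length = v.length := length_mem_pvProduct01 _ _ hw
    rw [sub_bridge v w hl, sup_bridge v w hl, dis_bridge v w hl, Bool.or_assoc]
  rw [hstep]
  -- the seven pointwise counts
  have hP : L.countP (fun w => pvZipAll pvFsub v w) = 2 ^ k := by
    have := count_eval pvFsub 2 1 v (by intro a h; simp [pvFsub, h]) (by intro a h; simp [pvFsub, h])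
    simpa using this
  have hQ : L.countP (fun w => pvZipAll pvFsup v w) = 2 ^ (n - k) := by
    have := count_eval pvFsup 1 2 v (by intro a h; simp [pvFsup, h]) (by intro a h; simp [pvFsup, h])
    simpa using this
  have hR : L.countP (fun w => pvZipAll pvFdis v w) = 2 ^ (n - k) := by
    have := count_eval pvFdis 1 2 v (by intro a h; simp [pvFdis, h]) (by intro a h; simp [pvFdis, h])
    simpa using this
  have hPQ : L.countP (fun w => pvZipAll (fun a b => pvFsub a b && pvFsup a b) v w) = 1 := by
    have := count_eval (fun a b => pvFsub a b && pvFsup a b) 1 1 v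
      (by intro a h; simp [pvFsub, pvFsup, h]) (by intro a h; simp [pvFsub, pvFsup, h])
    simpa using this
  have hPR : L.countP (fun w => pvZipAll (fun a b => pvFsub a b && pvFdis a b) v w) = 1 := by
    have := count_eval (fun a b => pvFsub a b && pvFdis a b) 1 1 v
      (by intro a h; simp [pvFsub, pvFdis]) (by intro a h; simp [pvFsub, pvFdis, h])
    simpa using this
  have hQR : L.countP (fun w => pvZipAll (fun a b => pvFsup a b && pvFdis a b) v w) = 0 ^ k * 2 ^ (n - k) := by
    exact count_eval (fun a b => pvFsup a b && pvFdis a b) 0 2 v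
      (by intro a h; simp [pvFsup, pvFdis, h]) (by intro a h; simp [pvFsup, pvFdis, h])
  have hT : L.countP (fun w => pvZipAll (fun a b => (pvFsub a b && pvFsup a b) && (pvFsub a b && pvFdis a b)) v w) = 0 ^ k := by
    have := count_eval (fun a b => (pvFsub a b && pvFsup a b) && (pvFsub a b && pvFdis a b)) 0 1 v
      (by intro a h; simp [pvFsub, pvFsup, pvFdis, h]) (by intro a h; simp [pvFsub, pvFsup, pvFdis, h])
    simpa using this
  -- inclusion–exclusion
  have e1 := countP_or_add L (fun w => pvZipAll pvFsub v w) (fun w => pvZipAll pvFsup v w || pvZipAll pvFdis v w)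
  have e2 := countP_or_add L (fun w => pvZipAll pvFsup v w) (fun w => pvZipAll pvFdis v w)
  have e3 := countP_or_add L (fun w => pvZipAll pvFsub v w && pvZipAll pvFsup v w)
      (fun w => pvZipAll pvFsub v w && pvZipAll pvFdis v w)
  -- rewrite the conjunction counts into pointwise form
  have r2 : L.countP (fun w => pvZipAll pvFsup v w && pvZipAll pvFdis v w)
      = L.countP (fun w => pvZipAll (fun a b => pvFsup a b && pvFdis a b) v w) := by
    apply countP_congr_mem; intro w _; rw [all_and_zip]
  have rdistr : L.countP (fun w => pvZipAll pvFsub v w && (pvZipAll pvFsup v w || pvZipAll pvFdis v w))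
      = L.countP (fun w => (pvZipAll pvFsub v w && pvZipAll pvFsup v w) || (pvZipAll pvFsub v w && pvZipAll pvFdis v w)) := by
    apply countP_congr_mem; intro w _; rw [Bool.and_or_distrib_left]
  have r3a : L.countP (fun w => pvZipAll pvFsub v w && pvZipAll pvFsup v w)
      = L.countP (fun w => pvZipAll (fun a b => pvFsub a b && pvFsup a b) v w) := by
    apply countP_congr_mem; intro w _; rw [all_and_zip]
  have r3b : L.countP (fun w => pvZipAll pvFsub v w && pvZipAll pvFdis v w)
      = L.countP (fun w => pvZipAll (fun a b => pvFsub a b && pvFdis a b) v w) := by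
    apply countP_congr_mem; intro w _; rw [all_and_zip]
  have r3c : L.countP (fun w => (pvZipAll pvFsub v w && pvZipAll pvFsup v w) && (pvZipAll pvFsub v w && pvZipAll pvFdis v w))
      = L.countP (fun w => pvZipAll (fun a b => (pvFsub a b && pvFsup a b) && (pvFsub a b && pvFdis a b)) v w) := by
    apply countP_congr_mem; intro w _; rw [← all_and_zip, ← all_and_zip, ← all_and_zip]
  rw [r2, hQR] at e2
  rw [r3a, r3b, hPQ, hPR, r3c, hT] at e3
  rw [rdistr] at e1
  rw [hP, hQ, hR] at *
  -- solve the arithmetic, splitting on k = 0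
  set N := L.countP (fun w => pvZipAll pvFsub v w || (pvZipAll pvFsup v w || pvZipAll pvFdis v w)) with hN
  set Y := L.countP (fun w => pvZipAll pvFsup v w || pvZipAll pvFdis v w) with hY
  set X := L.countP (fun w => (pvZipAll pvFsub v w && pvZipAll pvFsup v w) || (pvZipAll pvFsub v w && pvZipAll pvFdis v w)) with hX
  have hM1 : 1 ≤ 2 ^ (n - k) := Nat.one_le_two_pow
  have hK1 : 1 ≤ 2 ^ k := Nat.one_le_two_pow
  by_cases h : k = 0
  · have hz : (0:Nat) ^ k = 1 := by rw [h, pow_zero]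
    have hKk : (2:Nat) ^ k = 1 := by rw [h, pow_zero]
    have hMn : (2:Nat) ^ (n - k) = 2 ^ n := by rw [h, Nat.sub_zero]
    rw [hz] at e2 e3
    rw [hKk] at e1
    have hNval : N = 2 ^ (n - k) := by omega
    rw [if_pos h, hNval, hMn]
    push_cast
    ring
  · rw [if_neg h]
    have hz : (0:Nat) ^ k = 0 := zero_pow h
    rw [hz] at e2 e3
    have hNval : N = 2 ^ k + 2 * 2 ^ (n - k) - 2 := by omega
    have hpow : (2:Nat) ^ (n - k + 1) = 2 * 2 ^ (n - k) := by rw [pow_succ]; ring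
    have hcast : (2:Int) ^ k = ((2 ^ k : Nat) : Int) := by push_cast; ring
    have hcast2 : (2:Int) ^ (n - k + 1) = ((2 * 2 ^ (n - k) : Nat) : Int) := by
      rw [← hpow]; push_cast; ring
    rw [hNval, hcast, hcast2]
    omega
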